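-- pv_equiv track=rewrite | github.com/TG-Lim/Algorithm_interview | leetcode/bi_158_1.py | maxSumDistinctTriplet
-- ===== SOURCE A (Python) =====
-- from typing import List
--
-- def maxSumDistinctTriplet(x: List[int], y: List[int]) -> int:
--     n = len(x)
--     array = [(i, x[i], y[i]) for i in range(n)]
--     array.sort(key=lambda x: -x[2])
--
--     x_value = []
--     y_value = []
--     for i in range(n):
--         if not y_value: # 없으면 넣기
--             x_value.append(array[i][1])
--             y_value.append(array[i][2])
--         else:
--             if array[i][1] not in x_value:
--                 x_value.append(array[i][1])
--                 y_value.append(array[i][2])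
--
--         if len(y_value) == 3:
--             break
--
--     if len(y_value) == 3:
--         return sum(y_value)
--     else:
--         return -1
-- ===== SOURCE B (Python) =====
-- from typing import List
--
-- def maxSumDistinctTriplet(x: List[int], y: List[int]) -> int:
--     best = {}
--     for xi, yi in zip(x, y):
--         if xi not in best or yi > best[xi]:
--             best[xi] = yi
--     vals = sorted(best.values(), reverse=True)
--     return sum(vals[:3]) if len(vals) >= 3 else -1
-- ===== Notes on version B (the rewrite author's own statement) =====
-- stated objective: alternative
-- what changed: Instead of building and sorting all n (index, x, y) triples and greedily scanning them for three distinct x's, B aggregates the maximum y per distinct x in one dict pass and sorts only the distinct maxima, summing the top three.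
import Mathlib
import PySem

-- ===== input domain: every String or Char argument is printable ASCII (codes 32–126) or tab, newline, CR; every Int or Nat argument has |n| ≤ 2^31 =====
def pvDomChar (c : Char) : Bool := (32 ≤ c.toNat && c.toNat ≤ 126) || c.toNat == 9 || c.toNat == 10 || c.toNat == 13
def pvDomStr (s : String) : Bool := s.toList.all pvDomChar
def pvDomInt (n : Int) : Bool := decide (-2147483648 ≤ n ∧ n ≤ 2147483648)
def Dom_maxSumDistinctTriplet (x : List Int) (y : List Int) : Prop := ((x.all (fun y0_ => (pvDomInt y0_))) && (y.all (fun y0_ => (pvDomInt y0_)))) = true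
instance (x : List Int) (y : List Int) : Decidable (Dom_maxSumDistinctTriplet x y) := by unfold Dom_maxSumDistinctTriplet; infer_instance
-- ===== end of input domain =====

-- B replaces A's sort of all n (index, x, y) triples + greedy scan by a one-pass
-- per-x maximum dict and a sort of only the distinct maxima (objective: alternative).

-- ===== PORT A =====
-- the 'for i in range(n)' loop with its 'break' at len(y_value) == 3
def aLoop : List (Int × Int × Int) → List Int → List Int → List Int × List Int
  | [], xv, yv => (xv, yv)
  | t :: rest, xv, yv =>
    let st := if yv = [] then (xv ++ [t.2.1], yv ++ [t.2.2])
      else if t.2.1 ∉ xv then (xv ++ [t.2.1], yv ++ [t.2.2])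
      else (xv, yv)
    if st.2.length = 3 then st else aLoop rest st.1 st.2

def maxSumDistinctTriplet (x : List Int) (y : List Int) : Int :=
  let n : Int := PySem.List.len x
  let array := (PySem.List.pyRange 0 n 1).map
      (fun i => (i, PySem.List.pyGetD x i 0, PySem.List.pyGetD y i 0))
  let arr := PySem.List.sorted array (fun t => -t.2.2) false
  let r := aLoop arr [] []
  if r.2.length = 3 then r.2.sum else -1

-- ===== PORT B =====
-- 'if xi not in best or yi > best[xi]: best[xi] = yi'
def bStep (d : PySem.Dict Int Int) (e : Int × Int) : PySem.Dict Int Int :=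
  match d.get? e.1 with
  | none => d.insert e.1 e.2
  | some v => if v < e.2 then d.insert e.1 e.2 else d

def maxSumDistinctTriplet_alt (x : List Int) (y : List Int) : Int :=
  let best := (x.zip y).foldl bStep PySem.Dict.empty
  let vals := PySem.List.sorted (PySem.Dict.values best) (fun v => v) true
  if 3 ≤ vals.length then (vals.take 3).sum else -1   -- vals[:3] = take 3

-- ===== PRECONDITION & SPEC =====
-- A indexes y[i] for every i < len(x): it raises IndexError when len(y) < len(x).
def Pre_maxSumDistinctTriplet (x : List Int) (y : List Int) : Prop := x.length ≤ y.length
instance (x : List Int) (y : List Int) : Decidable (Pre_maxSumDistinctTriplet x y) := by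
  unfold Pre_maxSumDistinctTriplet; infer_instance

def pvWitness_maxSumDistinctTriplet : List Int × List Int := ([1, 2, 3], [4, 5, 6])

def Spec_maxSumDistinctTriplet (x : List Int) (y : List Int) (out : Int) : Prop :=
  out = maxSumDistinctTriplet_alt x y
instance (x : List Int) (y : List Int) (out : Int) : Decidable (Spec_maxSumDistinctTriplet x y out) := by
  unfold Spec_maxSumDistinctTriplet; infer_instance

-- ===== CLAIM (what is proved, stated in full; the proofs are below) =====
def Claim_equal_maxSumDistinctTriplet : Prop := ∀ (x : List Int) (y : List Int), Dom_maxSumDistinctTriplet x y → Pre_maxSumDistinctTriplet x y → Spec_maxSumDistinctTriplet x y (maxSumDistinctTriplet x y)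

-- ===== LEMMAS AND PROOFS =====

-- the maximum y among the entries of p whose x-component is k (none if there is none)
def maxY : List (Int × Int) → Int → Option Int
  | [], _ => none
  | e :: p, k =>
    if e.1 = k then
      some (match maxY p k with | none => e.2 | some v => max e.2 v)
    else maxY p k

-- first entry per distinct x-component, skipping keys already in `seen`
def fpx : List (Int × Int) → List Int → List (Int × Int)
  | [], _ => []
  | e :: r, seen => if e.1 ∈ seen then fpx r seen else e :: fpx r (seen ++ [e.1])

-- aLoop seen through the projection to the (x, y) pair components
def pLoop : List (Int × Int) → List Int → List Int → List Int × List Int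
  | [], xv, yv => (xv, yv)
  | e :: rest, xv, yv =>
    let st := if yv = [] then (xv ++ [e.1], yv ++ [e.2])
      else if e.1 ∉ xv then (xv ++ [e.1], yv ++ [e.2])
      else (xv, yv)
    if st.2.length = 3 then st else pLoop rest st.1 st.2

theorem aLoop_eq_pLoop (s : List (Int × Int × Int)) : ∀ (xv yv : List Int),
    aLoop s xv yv = pLoop (s.map (fun t => t.2)) xv yv := by
  induction s with
  | nil => intro xv yv; simp [aLoop, pLoop]
  | cons t rest ih => intro xv yv; simp [aLoop, pLoop, ih]

theorem map_insertBy {α β : Type} (f : α → β) (bef : α → α → Bool) (bef' : β → β → Bool)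
    (h : ∀ a b, bef a b = bef' (f a) (f b)) (z : α) (ys : List α) :
    (PySem.List.insertBy bef z ys).map f = PySem.List.insertBy bef' (f z) (ys.map f) := by
  induction ys with
  | nil => simp [PySem.List.insertBy]
  | cons w ws ih =>
    simp only [PySem.List.insertBy, List.map]
    rw [h]
    by_cases hb : bef' (f z) (f w) = true
    · simp [hb]
    · simp only [hb, Bool.false_eq_true, if_false, List.map, List.cons.injEq, true_and]
      exact ih

theorem map_foldl_insertBy {α β : Type} (f : α → β) (bef : α → α → Bool) (bef' : β → β → Bool)
    (h : ∀ a b, bef a b = bef' (f a) (f b)) (s : List α) : ∀ (acc : List α),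
    (s.foldl (fun acc x => PySem.List.insertBy bef x acc) acc).map f
      = (s.map f).foldl (fun acc x => PySem.List.insertBy bef' x acc) (acc.map f) := by
  induction s with
  | nil => intro acc; simp
  | cons t rest ih =>
    intro acc
    simp only [List.foldl_cons, List.map, ih, map_insertBy f bef bef' h]

theorem sorted_map_snd (s : List (Int × Int × Int)) :
    (PySem.List.sorted s (fun t => -t.2.2) false).map (fun t => t.2)
      = PySem.List.sorted (s.map (fun t => t.2)) (fun e => -e.2) false := by
  rw [PySem.List.sorted_eq_foldl_insertBy, PySem.List.sorted_eq_foldl_insertBy]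
  have h := map_foldl_insertBy (fun t : Int × Int × Int => t.2)
    (fun a b => decide ((-a.2.2 : Int) < -b.2.2)) (fun a b => decide ((-a.2 : Int) < -b.2))
    (fun a b => rfl) s []
  simpa using h

theorem pLoop_snd (q : List (Int × Int)) : ∀ (xv yv : List Int),
    yv.length < 3 → (yv = [] → xv = []) →
    (pLoop q xv yv).2 = yv ++ ((fpx q xv).map (fun e => e.2)).take (3 - yv.length) := by
  induction q with
  | nil => intro xv yv h1 h2; simp [pLoop, fpx]
  | cons e r ih =>
    intro xv yv h1 h2
    by_cases hm : e.1 ∈ xv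
    · have hyv : yv ≠ [] := by
        intro h; rw [h2 h] at hm; simp at hm
      have hlen : ¬ (yv.length = 3) := by omega
      have hst : (if yv = [] then (xv ++ [e.1], yv ++ [e.2])
          else if e.1 ∉ xv then (xv ++ [e.1], yv ++ [e.2])
          else (xv, yv)) = (xv, yv) := by simp [hyv, hm]
      rw [show pLoop (e :: r) xv yv = (if (xv, yv).2.length = 3 then (xv, yv) else pLoop r xv yv)
        by simp only [pLoop, hst]]
      rw [show fpx (e :: r) xv = fpx r xv by simp [fpx, hm]]
      simp only [hlen, if_false]
      exact ih xv yv h1 h2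
    · have hst : (if yv = [] then (xv ++ [e.1], yv ++ [e.2])
          else if e.1 ∉ xv then (xv ++ [e.1], yv ++ [e.2])
          else (xv, yv)) = (xv ++ [e.1], yv ++ [e.2]) := by
        by_cases hy : yv = [] <;> simp [hy, hm]
      rw [show pLoop (e :: r) xv yv = (if (yv ++ [e.2]).length = 3
            then (xv ++ [e.1], yv ++ [e.2])
            else pLoop r (xv ++ [e.1]) (yv ++ [e.2])) by
        simp only [pLoop, hst]]
      have hfpx : fpx (e :: r) xv = e :: fpx r (xv ++ [e.1]) := by simp [fpx, hm]
      rw [hfpx]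
      by_cases h3 : yv.length = 2
      · have : (yv ++ [e.2]).length = 3 := by simp [h3]
        simp only [this, if_pos, List.map]
        have : 3 - yv.length = 1 := by omega
        simp [this]
      · have hne : ¬ ((yv ++ [e.2]).length = 3) := by simp; omega
        simp only [hne, if_false]
        rw [ih (xv ++ [e.1]) (yv ++ [e.2]) (by simp; omega) (by simp)]
        have : 3 - yv.length = (3 - (yv ++ [e.2]).length) + 1 := by simp; omega
        rw [this, List.map, List.take_succ_cons, List.append_assoc]
        simp

theorem fpx_sublist (q : List (Int × Int)) : ∀ seen, (fpx q seen).Sublist q := by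
  induction q with
  | nil => intro seen; simp [fpx]
  | cons e r ih =>
    intro seen
    by_cases hm : e.1 ∈ seen
    · simp only [fpx, hm, ite_true]
      exact (ih seen).trans (List.sublist_cons_self e r)
    · simp only [fpx, hm, ite_false]
      exact (ih (seen ++ [e.1])).cons₂ e

theorem mem_map_fst_fpx (q : List (Int × Int)) : ∀ (seen : List Int) (k : Int),
    k ∈ (fpx q seen).map (fun e => e.1) ↔ (k ∈ q.map (fun e => e.1) ∧ k ∉ seen) := by
  induction q with
  | nil => intro seen k; simp [fpx]
  | cons e r ih =>
    intro seen k
    by_cases hm : e.1 ∈ seen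
    · simp only [fpx, hm, ite_true, List.map, List.mem_cons, ih]
      constructor
      · rintro ⟨h1, h2⟩; exact ⟨Or.inr h1, h2⟩
      · rintro ⟨h1 | h1, h2⟩
        · exact absurd (h1 ▸ hm) h2
        · exact ⟨h1, h2⟩
    · simp only [fpx, hm, ite_false, List.map, List.mem_cons, ih]
      constructor
      · rintro (h | ⟨h1, h2⟩)
        · exact ⟨Or.inl h, h ▸ hm⟩
        · simp at h2; exact ⟨Or.inr h1, h2.1⟩
      · rintro ⟨h1 | h1, h2⟩
        · exact Or.inl h1
        · by_cases hk : k = e.1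
          · exact Or.inl hk
          · exact Or.inr ⟨h1, by simp [h2, hk]⟩

theorem nodup_map_fst_fpx (q : List (Int × Int)) : ∀ seen, ((fpx q seen).map (fun e => e.1)).Nodup := by
  induction q with
  | nil => intro seen; simp [fpx]
  | cons e r ih =>
    intro seen
    by_cases hm : e.1 ∈ seen
    · simpa [fpx, hm] using ih seen
    · simp only [fpx, hm, ite_false, List.map, List.nodup_cons]
      refine ⟨?_, ih (seen ++ [e.1])⟩
      rw [mem_map_fst_fpx]
      rintro ⟨-, h⟩
      simp at h

theorem fpx_max (q : List (Int × Int)) (hq : q.Pairwise (fun a b => b.2 ≤ a.2)) :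
    ∀ seen, ∀ e ∈ fpx q seen, ∀ e' ∈ q, e'.1 = e.1 → e'.2 ≤ e.2 := by
  induction q with
  | nil => intro seen e he; simp [fpx] at he
  | cons a r ih =>
    rw [List.pairwise_cons] at hq
    intro seen e he e' he' hk
    by_cases hm : a.1 ∈ seen
    · simp only [fpx, hm, ite_true] at he
      rcases List.mem_cons.1 he' with h | h
      · -- e' = a, but e's key ∉ seen while e.1 = a.1 ∈ seen: contradiction
        exfalso
        have : e.1 ∈ (fpx r seen).map (fun e => e.1) := List.mem_map_of_mem he
        rw [mem_map_fst_fpx] at this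
        exact this.2 (by rw [← hk, h]; exact hm)
      · exact ih hq.2 seen e he e' h hk
    · simp only [fpx, hm, ite_false] at he
      rcases List.mem_cons.1 he with h1 | h1
      · subst h1
        rcases List.mem_cons.1 he' with h | h
        · rw [h]
        · exact hq.1 e' h
      · rcases List.mem_cons.1 he' with h | h
        · exfalso
          have : e.1 ∈ (fpx r (seen ++ [a.1])).map (fun e => e.1) := List.mem_map_of_mem h1
          rw [mem_map_fst_fpx] at this
          exact this.2 (by rw [← hk, h]; simp)
        · exact ih hq.2 (seen ++ [a.1]) e h1 e' h hk

theorem maxY_eq_none_iff (p : List (Int × Int)) (k : Int) :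
    maxY p k = none ↔ k ∉ p.map (fun e => e.1) := by
  induction p with
  | nil => simp [maxY]
  | cons a p ih =>
    by_cases ha : a.1 = k
    · simp [maxY, ha]
    · have ha' : k ≠ a.1 := fun h => ha h.symm
      simp [maxY, ha, ih, ha']

theorem maxY_ub (p : List (Int × Int)) (k : Int) : ∀ (v : Int), maxY p k = some v →
    ∀ e ∈ p, e.1 = k → e.2 ≤ v := by
  induction p with
  | nil => intro v h e he; simp at he
  | cons a p ih =>
    intro v h e he hk
    by_cases ha : a.1 = k
    · simp only [maxY, ha, ite_true] at h
      rcases List.mem_cons.1 he with rfl | hm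
      · cases hmp : maxY p k with
        | none => simp [hmp] at h; omega
        | some w => simp [hmp] at h; omega
      · cases hmp : maxY p k with
        | none =>
          exfalso
          exact (maxY_eq_none_iff p k).mp hmp (hk ▸ List.mem_map_of_mem hm)
        | some w =>
          have hw := ih w hmp e hm hk
          simp [hmp] at h
          omega
    · simp only [maxY, ha, ite_false] at h
      rcases List.mem_cons.1 he with rfl | hm
      · exact absurd hk ha
      · exact ih v h e hm hk

theorem maxY_mem (p : List (Int × Int)) (k : Int) : ∀ (v : Int), maxY p k = some v →
    (k, v) ∈ p := by
  induction p with
  | nil => intro v h; simp [maxY] at h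
  | cons a p ih =>
    intro v h
    by_cases ha : a.1 = k
    · simp only [maxY, ha, ite_true] at h
      cases hmp : maxY p k with
      | none =>
        simp [hmp] at h
        subst h
        exact List.mem_cons.2 (Or.inl (by rw [← ha]))
      | some w =>
        simp [hmp] at h
        rcases max_cases a.2 w with ⟨hm, -⟩ | ⟨hm, -⟩
        · rw [hm] at h; subst h; exact List.mem_cons.2 (Or.inl (by rw [← ha]))
        · rw [hm] at h; subst h; exact List.mem_cons_of_mem a (ih w hmp)
    · simp only [maxY, ha, ite_false] at h
      exact List.mem_cons_of_mem a (ih v h)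

theorem maxY_eq_some_of (p : List (Int × Int)) (k v : Int)
    (h1 : (k, v) ∈ p) (h2 : ∀ e ∈ p, e.1 = k → e.2 ≤ v) : maxY p k = some v := by
  cases hmp : maxY p k with
  | none =>
    exact absurd (List.mem_map_of_mem (f := fun e : Int × Int => e.1) h1)
      ((maxY_eq_none_iff p k).mp hmp)
  | some w =>
    have h3 := maxY_ub p k w hmp (k, v) h1 rfl
    have h4 := h2 (k, w) (maxY_mem p k w hmp) rfl
    exact congrArg some (le_antisymm h4 h3)

theorem maxY_append (p : List (Int × Int)) (e : Int × Int) (k : Int) :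
    maxY (p ++ [e]) k = if e.1 = k then
        some (match maxY p k with | none => e.2 | some v => max v e.2)
      else maxY p k := by
  induction p with
  | nil => simp only [List.nil_append, maxY]
  | cons a p ih =>
    by_cases ha : a.1 = k
    · simp only [List.cons_append, maxY, ha, ite_true, ih]
      by_cases he : e.1 = k
      · simp only [he, ite_true]
        cases hmp : maxY p k with
        | none => simp
        | some w =>
          simp only []
          congr 1
          exact (max_assoc a.2 w e.2).symm
      · simp [he]
    · simp only [List.cons_append, maxY, ha, ite_false, ih]

theorem bStep_get? (d : PySem.Dict Int Int) (e : Int × Int) (k : Int) :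
    (bStep d e).get? k = if e.1 = k then
        some (match d.get? e.1 with | none => e.2 | some v => max v e.2)
      else d.get? k := by
  unfold bStep
  cases hmp : d.get? e.1 with
  | none =>
    by_cases he : e.1 = k
    · subst he; simp [PySem.Dict.get?_insert_self]
    · have hk : ¬ k = e.1 := fun h => he h.symm
      simp [he, hk, PySem.Dict.get?_insert]
  | some w =>
    by_cases hlt : w < e.2
    · by_cases he : e.1 = k
      · subst he
        simp [hlt, PySem.Dict.get?_insert_self, max_eq_right (le_of_lt hlt)]
      · have hk : ¬ k = e.1 := fun h => he h.symm
        simp [hlt, he, hk, PySem.Dict.get?_insert]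
    · by_cases he : e.1 = k
      · subst he
        simp [hlt, hmp, max_eq_left (by omega : e.2 ≤ w)]
      · simp [hlt, he]

theorem bStep_nodup_keys (d : PySem.Dict Int Int) (e : Int × Int) (h : d.keys.Nodup) :
    (bStep d e).keys.Nodup := by
  unfold bStep
  cases d.get? e.1 with
  | none => exact PySem.Dict.nodup_keys_insert _ _ _ h
  | some w =>
    by_cases hlt : w < e.2
    · simp only [hlt, ite_true]
      exact PySem.Dict.nodup_keys_insert _ _ _ h
    · simp only [hlt, ite_false]
      exact h

theorem get?_bFold (p : List (Int × Int)) : ∀ (k : Int),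
    (p.foldl bStep PySem.Dict.empty).get? k = maxY p k := by
  induction p using List.reverseRecOn with
  | nil => intro k; simp [maxY, PySem.Dict.get?_empty]
  | append_singleton p e ih =>
    intro k
    rw [List.foldl_append, List.foldl_cons, List.foldl_nil, maxY_append,
      bStep_get?, ih, ih]
    split_ifs with h
    · subst h; rfl
    · rfl

theorem nodup_keys_bFold (p : List (Int × Int)) :
    (p.foldl bStep PySem.Dict.empty).keys.Nodup := by
  induction p using List.reverseRecOn with
  | nil => exact PySem.Dict.nodup_keys_empty
  | append_singleton p e ih =>
    rw [List.foldl_append, List.foldl_cons, List.foldl_nil]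
    exact bStep_nodup_keys _ _ ih

theorem mem_keys_bFold (p : List (Int × Int)) (k : Int) :
    k ∈ (p.foldl bStep PySem.Dict.empty).keys ↔ k ∈ p.map (fun e => e.1) := by
  rw [← not_iff_not, ← PySem.Dict.get?_eq_none_iff_not_mem_keys, get?_bFold,
    maxY_eq_none_iff]

-- the y-list A's greedy scan extracts: per-x maxima in descending order
theorem main_lists_eq (x y : List Int) :
    (fpx (PySem.List.sorted (x.zip y) (fun e => -e.2) false) []).map (fun e => e.2)
      = PySem.List.sorted (PySem.Dict.values ((x.zip y).foldl bStep PySem.Dict.empty)) (fun v => v) true := by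
  set p := x.zip y with hp
  set q := PySem.List.sorted p (fun e => -e.2) false with hq'
  have hqperm : q.Perm p := PySem.List.sorted_perm p (fun e => -e.2) false
  have hq : q.Pairwise (fun a b => b.2 ≤ a.2) :=
    (PySem.List.sorted_pairwise p (fun e => -e.2)).imp (fun h => by omega)
  -- each extracted entry carries the maximum y of its x
  have hmaxY : ∀ e ∈ fpx q [], maxY p e.1 = some e.2 := by
    intro e he
    have heq : e ∈ q := (fpx_sublist q []).subset he
    refine maxY_eq_some_of p e.1 e.2 (by simpa using hqperm.mem_iff.1 heq) ?_
    intro e' he' hk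
    exact fpx_max q hq [] e he e' (hqperm.symm.mem_iff.1 he') hk
  have hA : (fpx q []).map (fun e => e.2)
      = ((fpx q []).map (fun e => e.1)).map (fun k => (maxY p k).getD 0) := by
    rw [List.map_map]
    exact List.map_congr_left (fun e he => by simp [hmaxY e he])
  -- the dict's values are the same per-x maxima over the same key set
  have hB : PySem.Dict.values (p.foldl bStep PySem.Dict.empty)
      = (p.foldl bStep PySem.Dict.empty).keys.map (fun k => (maxY p k).getD 0) := by
    rw [PySem.Dict.values_eq_map_keys _ (nodup_keys_bFold p) 0]
    exact List.map_congr_left (fun k _ => by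
      rw [PySem.Dict.getD_eq_get?_getD, get?_bFold])
  have hkeysperm : ((fpx q []).map (fun e => e.1)).Perm
      (p.foldl bStep PySem.Dict.empty).keys := by
    refine (List.perm_ext_iff_of_nodup (nodup_map_fst_fpx q []) (nodup_keys_bFold p)).2 ?_
    intro k
    rw [mem_map_fst_fpx, mem_keys_bFold]
    simp [(hqperm.map (fun e => e.1)).mem_iff]
  have hperm : ((fpx q []).map (fun e => e.2)).Perm
      (PySem.List.sorted ((p.foldl bStep PySem.Dict.empty).values) (fun v => v) true) := by
    rw [hA, hB]
    exact (hkeysperm.map _).trans (PySem.List.sorted_perm _ (fun v => v) true).symm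
  -- both sides are descending, hence equal
  have hApw : ((fpx q []).map (fun e => e.2)).Pairwise (fun a b => b ≤ a) :=
    List.pairwise_map.2 ((hq.sublist (fpx_sublist q [])).imp (fun h => h))
  have hBpw := PySem.List.sorted_pairwise_rev ((p.foldl bStep PySem.Dict.empty).values) (fun v => v)
  exact PySem.List.eq_of_perm_of_pairwise_le_of_injective (fun v : Int => -v)
    neg_injective hperm (hApw.imp (fun h => neg_le_neg h)) (hBpw.imp (fun h => neg_le_neg h))

theorem array_map_snd (x y : List Int) (hpre : x.length ≤ y.length) :
    ((PySem.List.pyRange 0 (PySem.List.len x) 1).map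
        (fun i => (i, PySem.List.pyGetD x i 0, PySem.List.pyGetD y i 0))).map (fun t => t.2)
      = x.zip y := by
  show ((PySem.List.pyRange 0 ((x.length : Int)) 1).map _).map _ = _
  rw [PySem.List.pyRange_zero_nat]
  apply List.ext_getElem
  · simp [hpre]
  · intro k h1 h2
    simp only [List.getElem_map, List.getElem_range, PySem.List.pyGetD_natCast,
      List.getElem_zip]
    have hk : k < x.length := by simp [List.length_zip] at h2; omega
    rw [List.getD_eq_getElem x 0 hk, List.getD_eq_getElem y 0 (by omega)]

-- ===== VERDICT (by name: the statement is the Claim_ definition above) =====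
theorem maxSumDistinctTriplet_spec : Claim_equal_maxSumDistinctTriplet := by
  intro x y _ hpre
  unfold Pre_maxSumDistinctTriplet at hpre
  unfold Spec_maxSumDistinctTriplet maxSumDistinctTriplet maxSumDistinctTriplet_alt
  simp only []
  rw [aLoop_eq_pLoop, sorted_map_snd, array_map_snd x y hpre,
    pLoop_snd _ [] [] (by simp) (fun _ => rfl)]
  simp only [List.nil_append, List.length_nil, Nat.sub_zero]
  rw [main_lists_eq x y]
  set vals := PySem.List.sorted
    (PySem.Dict.values ((x.zip y).foldl bStep PySem.Dict.empty)) (fun v => v) true with hv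
  by_cases h : 3 ≤ vals.length
  · have : (vals.take 3).length = 3 := by simp [List.length_take]; omega
    simp [this, h]
  · simp [h]
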